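-- pv_equiv track=rewrite | github.com/Lanerra/saga | processing/zero_copy_context_generator.py | _generate_next_chapter_guidance
-- ===== SOURCE A (Python) =====
-- def _generate_next_chapter_guidance(text: str, summary: str, chap_num: int) -> str:
--     """
--     Generate guidance for the next chapter based on current chapter's ending.
--     Extracts concrete narrative states like character locations, plot developments.
--     """
--     guidance_parts = []
--
--     # Extract character locations and states from the ending
--     ending_section = text[-1500:] if text else ""  # Last ~1500 chars
--
--     # Look for location indicators
--     location_indicators = [
--         "stood at",
--         "stood in",
--         "stood before",
--         "stood near",
--         "sat in",
--         "sat at",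
--         "sat before",
--         "sat near",
--         "walked to",
--         "walked toward",
--         "walked into",
--         "entered",
--         "arrived at",
--         "reached",
--         "found himself",
--         "found herself",
--         "remained in",
--         "stayed in",
--     ]
--
--     character_locations = []
--     for indicator in location_indicators:
--         if indicator in ending_section.lower():
--             # Extract sentence containing location
--             sentences = ending_section.split(".")
--             for sentence in sentences:
--                 if indicator in sentence.lower():
--                     character_locations.append(sentence.strip())
--                     break
--
--     if character_locations:
--         guidance_parts.append(f"Character Positions: {character_locations[-1]}")
--
--     # Look for unresolved conflicts or pending actions
--     conflict_indicators = [
--         "but",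
--         "however",
--         "yet",
--         "still",
--         "then",
--         "suddenly",
--         "before he could",
--         "before she could",
--         "interrupted by",
--         "heard",
--         "saw",
--         "felt",
--         "sensed",
--         "realized",
--     ]
--
--     pending_actions = []
--     sentences = ending_section.split(".")
--     for sentence in sentences[-3:]:  # Last 3 sentences
--         for indicator in conflict_indicators:
--             if indicator in sentence.lower():
--                 pending_actions.append(sentence.strip())
--                 break
--
--     if pending_actions:
--         guidance_parts.append(f"Unresolved Elements: {pending_actions[-1]}")
--
--     # Add plot progression note
--     guidance_parts.append(
--         f"Chapter {chap_num + 1} should continue from this point, advancing the plot to the next stage rather than repeating previous discoveries."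
--     )
--
--     return " | ".join(guidance_parts) if guidance_parts else ""
-- ===== SOURCE B (Python) =====
-- LOCATION_INDICATORS = (
--     "stood at", "stood in", "stood before", "stood near",
--     "sat in", "sat at", "sat before", "sat near",
--     "walked to", "walked toward", "walked into",
--     "entered", "arrived at", "reached",
--     "found himself", "found herself", "remained in", "stayed in",
-- )
--
-- CONFLICT_INDICATORS = (
--     "but", "however", "yet", "still", "then", "suddenly",
--     "before he could", "before she could", "interrupted by",
--     "heard", "saw", "felt", "sensed", "realized",
-- )
--
--
-- def _generate_next_chapter_guidance(text: str, summary: str, chap_num: int) -> str: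
--     """Single fused sentence-major pass: instead of one scan of the sentence list per
--     indicator, each sentence is visited once; a running argmax over indicator ranks
--     picks the location sentence and a last-match tracker picks the conflict sentence."""
--     ending = text[-1500:] if text else ""
--     sentences = ending.split(".")
--     cutoff = len(sentences) - 3
--     best_rank, best_sentence, conflict = -1, None, None
--     for i, s in enumerate(sentences):
--         low = s.lower()
--         rank = max((j for j, ind in enumerate(LOCATION_INDICATORS) if ind in low),
--                    default=-1)
--         if rank > best_rank:
--             best_rank, best_sentence = rank, s
--         if i >= cutoff and any(ind in low for ind in CONFLICT_INDICATORS):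
--             conflict = s
--     parts = []
--     if best_sentence is not None:
--         parts.append(f"Character Positions: {best_sentence.strip()}")
--     if conflict is not None:
--         parts.append(f"Unresolved Elements: {conflict.strip()}")
--     parts.append(
--         f"Chapter {chap_num + 1} should continue from this point, advancing the plot to the next stage rather than repeating previous discoveries."
--     )
--     return " | ".join(parts)
-- ===== Notes on version B (the rewrite author's own statement) =====
-- stated objective: alternative
-- what changed: Replaces A's indicator-major staged passes (one scan of the sentence list per location indicator, lists accumulated then last taken) by a single fused sentence-major pass that keeps a running argmax of indicator ranks for the location sentence and a last-match tracker for the conflict sentence.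
import Mathlib
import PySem

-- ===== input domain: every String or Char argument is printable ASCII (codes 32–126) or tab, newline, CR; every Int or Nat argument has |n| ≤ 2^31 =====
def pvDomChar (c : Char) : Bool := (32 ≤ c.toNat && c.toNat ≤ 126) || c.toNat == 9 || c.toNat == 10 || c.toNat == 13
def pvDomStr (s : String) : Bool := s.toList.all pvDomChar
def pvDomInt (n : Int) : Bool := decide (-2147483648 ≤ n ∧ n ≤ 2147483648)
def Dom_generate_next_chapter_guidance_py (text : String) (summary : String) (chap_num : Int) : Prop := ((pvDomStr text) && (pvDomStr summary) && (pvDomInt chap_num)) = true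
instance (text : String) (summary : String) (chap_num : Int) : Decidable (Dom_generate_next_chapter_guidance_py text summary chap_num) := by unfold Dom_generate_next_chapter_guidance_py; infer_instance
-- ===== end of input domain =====

-- B replaces A's indicator-major staged passes by one fused sentence-major pass
-- (running argmax of indicator ranks + last-conflict tracker); objective: alternative.

-- ===== PORT A =====
-- the two indicator lists, shared data of both versions
def pvLocIndicators : List String :=
  ["stood at", "stood in", "stood before", "stood near", "sat in", "sat at",
   "sat before", "sat near", "walked to", "walked toward", "walked into",
   "entered", "arrived at", "reached", "found himself", "found herself",
   "remained in", "stayed in"]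

def pvConfIndicators : List String :=
  ["but", "however", "yet", "still", "then", "suddenly", "before he could",
   "before she could", "interrupted by", "heard", "saw", "felt", "sensed", "realized"]

def pvPlotNote (chap_num : Int) : String :=
  "Chapter " ++ PySem.Int.toStr (chap_num + 1) ++ " should continue from this point, advancing the plot to the next stage rather than repeating previous discoveries."

def generate_next_chapter_guidance_py (text : String) (summary : String) (chap_num : Int) : String :=
  let ending := if text ≠ "" then PySem.Str.slice text (some (-1500)) none else ""
  -- character_locations loop: for indicator …: if indicator in ending.lower(): first sentence match, append
  let sentences := (PySem.Str.split? ending ".").getD []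
  let charLocs := pvLocIndicators.foldl (fun acc ind =>
    if PySem.Str.isIn ind (PySem.Str.lower ending) then
      match sentences.find? (fun s => PySem.Str.isIn ind (PySem.Str.lower s)) with
      | some s => acc ++ [PySem.Str.strip s]
      | none => acc
    else acc) []
  let gp1 : List String := match charLocs.getLast? with
    | some x => ["Character Positions: " ++ x]
    | none => []
  -- pending_actions loop over the last 3 sentences; inner for-with-break = any
  let lastSents := PySem.List.slice sentences (some (-3)) none
  let pend := lastSents.foldl (fun acc s =>
    if pvConfIndicators.any (fun ind => PySem.Str.isIn ind (PySem.Str.lower s)) then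
      acc ++ [PySem.Str.strip s]
    else acc) []
  let gp2 : List String := match pend.getLast? with
    | some x => ["Unresolved Elements: " ++ x]
    | none => []
  let gp := gp1 ++ gp2 ++ [pvPlotNote chap_num]
  if gp ≠ [] then PySem.Str.join " | " gp else ""

-- ===== PORT B =====
-- single fused pass over enumerate(sentences): running argmax of indicator ranks
-- (best_rank, best_sentence) plus the last conflict sentence among indices ≥ cutoff
def generate_next_chapter_guidance_py_alt (text : String) (summary : String) (chap_num : Int) : String :=
  let ending := if text ≠ "" then PySem.Str.slice text (some (-1500)) none else ""
  let sentences := (PySem.Str.split? ending ".").getD []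
  let cutoff : Int := (sentences.length : Int) - 3
  let st := (PySem.List.enumerate sentences 0).foldl
    (fun (st : (Int × Option String) × Option String) is =>
      let low := PySem.Str.lower is.2
      let rank := (PySem.List.enumerate pvLocIndicators 0).foldl
        (fun a ji => if PySem.Str.isIn ji.2 low then max a ji.1 else a) (-1)
      ((if rank > st.1.1 then (rank, some is.2) else st.1),
       (if is.1 ≥ cutoff ∧ pvConfIndicators.any (fun ind => PySem.Str.isIn ind low)
        then some is.2 else st.2)))
    ((-1, none), none)
  let part1 : List String := match st.1.2 with
    | some s => ["Character Positions: " ++ PySem.Str.strip s]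
    | none => []
  let part2 : List String := match st.2 with
    | some s => ["Unresolved Elements: " ++ PySem.Str.strip s]
    | none => []
  PySem.Str.join " | " (part1 ++ part2 ++ [pvPlotNote chap_num])

-- ===== PRECONDITION & SPEC =====
def Spec_generate_next_chapter_guidance_py (text : String) (summary : String) (chap_num : Int) (out : String) : Prop := out = generate_next_chapter_guidance_py_alt text summary chap_num
instance (text : String) (summary : String) (chap_num : Int) (out : String) : Decidable (Spec_generate_next_chapter_guidance_py text summary chap_num out) := by unfold Spec_generate_next_chapter_guidance_py; infer_instance

-- ===== CLAIM (what is proved, stated in full; the proofs are below) =====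
def Claim_equal_generate_next_chapter_guidance_py : Prop := ∀ (text : String) (summary : String) (chap_num : Int), Dom_generate_next_chapter_guidance_py text summary chap_num → Spec_generate_next_chapter_guidance_py text summary chap_num (generate_next_chapter_guidance_py text summary chap_num)

-- ===== LEMMAS AND PROOFS =====

-- q ind s: the sentence-level membership test both versions use
def pvQ (ind s : String) : Bool := PySem.Str.isIn ind (PySem.Str.lower s)

-- B's per-sentence rank: max index of a matching location indicator, -1 if none
def pvRank (s : String) : Int :=
  (PySem.List.enumerate pvLocIndicators 0).foldl
    (fun a ji => if PySem.Str.isIn ji.2 (PySem.Str.lower s) then max a ji.1 else a) (-1)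

-- running max of ranks over a processed prefix
def pvM (pfx : List String) : Int := pfx.foldl (fun a s => max a (pvRank s)) (-1)

-- canonical value of A's location answer on a prefix (unstripped)
def pvH (pfx : List String) : Option String :=
  pvLocIndicators.reverse.findSome? (fun ind => pfx.find? (fun s => pvQ ind s))

-- B's conflict predicate
def pvP (s : String) : Bool := pvConfIndicators.any (fun ind => PySem.Str.isIn ind (PySem.Str.lower s))

-- ---------- A-side lemmas (A's accumulate-then-last = findSome?/find? canonical form) ----------

theorem go_infix (sep cs : List Char) : ∀ (fuel : Nat) (l cur : List Char) (acc : List (List Char)),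
    (∀ a ∈ acc, a <:+: cs) → (cur.reverse ++ l) <:+: cs →
    ∀ p ∈ PySem.Chars.splitOn.go sep fuel l cur acc, p <:+: cs := by
  intro fuel
  induction fuel with
  | zero =>
    intro l cur acc hacc hcl p hp
    rw [PySem.Chars.splitOn.go.eq_1] at hp
    simp at hp
    rcases hp with h | h
    · exact hacc _ h
    · exact h ▸ hcl
  | succ fuel ih =>
    intro l cur acc hacc hcl p hp
    match l with
    | [] =>
      rw [PySem.Chars.splitOn.go.eq_2 sep (fuel+1) cur acc (by omega)] at hp
      simp at hp
      rcases hp with h | h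
      · exact hacc _ h
      · subst h
        exact List.IsInfix.trans (List.prefix_append _ _).isInfix hcl
    | c :: rest =>
      rw [PySem.Chars.splitOn.go.eq_3] at hp
      split at hp
      · refine ih _ _ _ ?_ ?_ p hp
        · intro a ha
          rcases List.mem_cons.mp ha with h | h
          · exact h ▸ List.IsInfix.trans (List.prefix_append _ _).isInfix hcl
          · exact hacc _ h
        · simp only [List.reverse_nil, List.nil_append]
          exact List.IsInfix.trans (List.drop_suffix _ _).isInfix
            (List.IsInfix.trans (List.suffix_append _ _).isInfix hcl)
      · refine ih _ _ _ hacc ?_ p hp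
        simpa using hcl

theorem mem_splitOn_infix (cs sep : List Char) (p : List Char)
    (hp : p ∈ PySem.Chars.splitOn cs sep) : p <:+: cs := by
  unfold PySem.Chars.splitOn at hp
  exact go_infix sep cs _ cs [] [] (by simp) (by simp) p hp

theorem mem_split?_infix (e : String) (s : String)
    (hs : s ∈ (PySem.Str.split? e ".").getD []) : s.toList <:+: e.toList := by
  have hmap := PySem.Str.split?_map e "."
  rw [PySem.Chars.split?] at hmap
  simp only [show (".".toList : List Char) = ['.'] from rfl] at hmap
  split at hmap
  · simp_all
  · match hL : PySem.Str.split? e "." with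
    | none => rw [hL] at hmap; simp at hmap
    | some L =>
      rw [hL] at hs hmap
      simp only [Option.map_some, Option.some.injEq] at hmap
      apply mem_splitOn_infix e.toList ['.']
      rw [← hmap]
      simpa using ⟨s, hs, rfl⟩

-- getLast? of an optional-flatMap is findSome? in reverse
theorem getLast?_flatMap_opt {α β : Type} (h : α → Option β) (xs : List α) :
    (xs.flatMap (fun a => (h a).toList)).getLast? = xs.reverse.findSome? h := by
  induction xs with
  | nil => rfl
  | cons x xs ih =>
    simp only [List.flatMap_cons, List.getLast?_append, List.reverse_cons,
      List.findSome?_append, ih]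
    cases hfs : xs.reverse.findSome? h <;> cases hx : h x <;> simp [hx, Option.or]

theorem getLast?_filter_map {α β : Type} (p : α → Bool) (f : α → β) (xs : List α) :
    ((xs.filter p).map f).getLast? = (xs.reverse.find? p).map f := by
  have h1 : (xs.filter p).map f
      = xs.flatMap (fun a => ((if p a then some (f a) else none) : Option β).toList) := by
    induction xs with
    | nil => rfl
    | cons x xs ih => cases hp : p x <;> simp [hp, ih]
  have h2 : xs.reverse.findSome? (fun a => if p a then some (f a) else none)
      = (xs.reverse.find? p).map f := by
    generalize xs.reverse = ys
    induction ys with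
    | nil => rfl
    | cons y ys ih => cases hp : p y <;> simp [hp, ih]
  rw [h1, getLast?_flatMap_opt, h2]

theorem findSome?_map_comp {α β γ : Type} (f : α → Option β) (g : β → γ) (xs : List α) :
    xs.findSome? (fun a => (f a).map g) = (xs.findSome? f).map g := by
  induction xs with
  | nil => rfl
  | cons x xs ih => cases hx : f x <;> simp [hx, ih]

theorem find?_some_isIn (ending ind s : String)
    (h : ((PySem.Str.split? ending ".").getD []).find?
        (fun t => PySem.Str.isIn ind (PySem.Str.lower t)) = some s) :
    PySem.Str.isIn ind (PySem.Str.lower ending) = true := by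
  have hmem := List.mem_of_find?_eq_some h
  have hq := List.find?_some h
  rw [PySem.Str.isIn_iff_infix] at hq ⊢
  rw [PySem.Str.toList_lower, PySem.Chars.lower] at hq ⊢
  exact hq.trans ((mem_split?_infix ending s hmem).map PySem.Chars.lowerChar)

-- ---------- B-side lemmas ----------

-- spec of the inner rank fold
theorem rank_fold_spec (low : String) : ∀ (L : List String) (k a : Int),
    a ≤ (PySem.List.enumerate L k).foldl
        (fun a ji => if PySem.Str.isIn ji.2 low then max a ji.1 else a) a ∧
    (∀ (j : Nat) (h : j < L.length), PySem.Str.isIn L[j] low = true →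
      k + (j : Int) ≤ (PySem.List.enumerate L k).foldl
        (fun a ji => if PySem.Str.isIn ji.2 low then max a ji.1 else a) a) ∧
    ((PySem.List.enumerate L k).foldl
        (fun a ji => if PySem.Str.isIn ji.2 low then max a ji.1 else a) a = a ∨
      ∃ (j : Nat), ∃ h : j < L.length, PySem.Str.isIn L[j] low = true ∧
        (PySem.List.enumerate L k).foldl
          (fun a ji => if PySem.Str.isIn ji.2 low then max a ji.1 else a) a = k + (j : Int)) := by
  intro L
  induction L with
  | nil =>
    intro k a
    simp [PySem.List.enumerate_nil]
  | cons x L ih =>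
    intro k a
    rw [PySem.List.enumerate_cons, List.foldl_cons]
    by_cases hx : PySem.Str.isIn x low = true
    · rw [if_pos hx]
      obtain ⟨h1, h2, h3⟩ := ih (k + 1) (max a k)
      refine ⟨le_trans (le_max_left a k) h1, ?_, ?_⟩
      · intro j hj hm
        match j with
        | 0 => simpa using le_trans (le_max_right a k) h1
        | j + 1 =>
          have := h2 j (by simpa using hj) (by simpa using hm)
          push_cast
          push_cast at this
          omega
      · rcases h3 with h | ⟨j, hj, hm, hr⟩
        · rcases le_total a k with hak | hka
          · exact Or.inr ⟨0, by simp, by simpa using hx, by rw [h]; omega⟩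
          · exact Or.inl (by rw [h]; omega)
        · refine Or.inr ⟨j + 1, by simpa using Nat.succ_lt_succ hj, by simpa using hm, ?_⟩
          rw [hr]; push_cast; omega
    · rw [if_neg hx]
      obtain ⟨h1, h2, h3⟩ := ih (k + 1) a
      refine ⟨h1, ?_, ?_⟩
      · intro j hj hm
        match j with
        | 0 => simp at hm; exact absurd hm hx
        | j + 1 =>
          have := h2 j (by simpa using hj) (by simpa using hm)
          push_cast
          push_cast at this
          omega
      · rcases h3 with h | ⟨j, hj, hm, hr⟩
        · exact Or.inl h
        · refine Or.inr ⟨j + 1, by simpa using Nat.succ_lt_succ hj, by simpa using hm, ?_⟩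
          rw [hr]; push_cast; omega

-- pvRank facts
theorem rank_lb (s : String) : -1 ≤ pvRank s :=
  (rank_fold_spec (PySem.Str.lower s) pvLocIndicators 0 (-1)).1

theorem rank_of_match (s : String) (j : Nat) (h : j < pvLocIndicators.length)
    (hm : pvQ pvLocIndicators[j] s = true) : (j : Int) ≤ pvRank s := by
  have := (rank_fold_spec (PySem.Str.lower s) pvLocIndicators 0 (-1)).2.1 j h (by simpa [pvQ] using hm)
  simpa [pvRank] using this

theorem rank_cases (s : String) : pvRank s = -1 ∨
    ∃ (j : Nat), ∃ h : j < pvLocIndicators.length,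
      pvQ pvLocIndicators[j] s = true ∧ pvRank s = (j : Int) := by
  rcases (rank_fold_spec (PySem.Str.lower s) pvLocIndicators 0 (-1)).2.2 with h | ⟨j, hj, hm, hr⟩
  · exact Or.inl h
  · exact Or.inr ⟨j, hj, by simpa [pvQ] using hm, by simpa [pvRank] using hr⟩

-- pvM facts
theorem M_fold_spec : ∀ (xs : List String) (a : Int),
    a ≤ xs.foldl (fun a s => max a (pvRank s)) a ∧
    (∀ x ∈ xs, pvRank x ≤ xs.foldl (fun a s => max a (pvRank s)) a) ∧
    (xs.foldl (fun a s => max a (pvRank s)) a = a ∨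
      ∃ x ∈ xs, xs.foldl (fun a s => max a (pvRank s)) a = pvRank x) := by
  intro xs
  induction xs with
  | nil => intro a; simp
  | cons x xs ih =>
    intro a
    rw [List.foldl_cons]
    obtain ⟨h1, h2, h3⟩ := ih (max a (pvRank x))
    refine ⟨le_trans (le_max_left _ _) h1, ?_, ?_⟩
    · intro y hy
      rcases List.mem_cons.mp hy with rfl | hy
      · exact le_trans (le_max_right _ _) h1
      · exact h2 y hy
    · rcases h3 with h | ⟨y, hy, hr⟩
      · rcases le_total a (pvRank x) with hax | hxa
        · exact Or.inr ⟨x, List.mem_cons_self, by rw [h]; omega⟩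
        · exact Or.inl (by rw [h]; omega)
      · exact Or.inr ⟨y, List.mem_cons_of_mem _ hy, hr⟩

theorem M_lb (pfx : List String) : -1 ≤ pvM pfx := (M_fold_spec pfx (-1)).1

theorem M_ub (pfx : List String) (s : String) (hs : s ∈ pfx) : pvRank s ≤ pvM pfx :=
  (M_fold_spec pfx (-1)).2.1 s hs

theorem M_cases (pfx : List String) : pvM pfx = -1 ∨ ∃ s ∈ pfx, pvM pfx = pvRank s :=
  (M_fold_spec pfx (-1)).2.2

theorem M_append_singleton (pfx : List String) (x : String) :
    pvM (pfx ++ [x]) = max (pvM pfx) (pvRank x) := by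
  simp [pvM, List.foldl_append]

-- reverse findSome? hits the largest index carrying a value
theorem findSome?_reverse_of_max {α β : Type} (g : α → Option β) (L : List α) (J : Nat)
    (hJ : J < L.length) (hsome : (g L[J]).isSome)
    (hnone : ∀ (j : Nat) (hj : j < L.length), J < j → g L[j] = none) :
    L.reverse.findSome? g = g L[J] := by
  conv_lhs => rw [← List.take_append_drop (J + 1) L]
  rw [List.reverse_append, List.findSome?_append]
  have hdrop : (L.drop (J + 1)).reverse.findSome? g = none := by
    rw [List.findSome?_eq_none_iff]
    intro x hx
    obtain ⟨i, hi, rfl⟩ := List.mem_iff_getElem.mp (List.mem_reverse.mp hx)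
    rw [List.getElem_drop]
    exact hnone _ (by simp at hi; omega) (by omega)
  have htake : L.take (J + 1) = L.take J ++ [L[J]] := List.take_succ_eq_append_getElem hJ
  rw [hdrop, htake, List.reverse_append]
  obtain ⟨v, hv⟩ := Option.isSome_iff_exists.mp hsome
  simp [hv]

theorem H_eq_none (pfx : List String) (h : pvM pfx = -1) : pvH pfx = none := by
  unfold pvH
  rw [List.findSome?_eq_none_iff]
  intro ind hind
  rw [List.find?_eq_none]
  intro s hs hq
  obtain ⟨j, hj, rfl⟩ := List.mem_iff_getElem.mp (List.mem_reverse.mp hind)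
  have h1 := rank_of_match s j hj hq
  have h2 := M_ub pfx s hs
  omega

theorem H_eq_find? (pfx : List String) (J : Nat) (hJ : J < pvLocIndicators.length)
    (hub : ∀ s ∈ pfx, pvRank s ≤ (J : Int))
    (hsome : ∃ s ∈ pfx, pvQ pvLocIndicators[J] s = true) :
    pvH pfx = pfx.find? (fun s => pvQ pvLocIndicators[J] s) := by
  unfold pvH
  refine findSome?_reverse_of_max _ pvLocIndicators J hJ ?_ ?_
  · rw [List.find?_isSome]
    obtain ⟨s, hs, hq⟩ := hsome
    exact ⟨s, hs, hq⟩
  · intro j hj hJj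
    rw [List.find?_eq_none]
    intro s hs hq
    have h1 := rank_of_match s j hj hq
    have h2 := hub s hs
    omega

theorem H_append_singleton (pfx : List String) (x : String) :
    pvH (pfx ++ [x]) = if pvRank x > pvM pfx then some x else pvH pfx := by
  by_cases hgt : pvRank x > pvM pfx
  · rw [if_pos hgt]
    rcases rank_cases x with h0 | ⟨j, hj, hq, hr⟩
    · have := M_lb pfx; omega
    · have hub : ∀ s ∈ pfx ++ [x], pvRank s ≤ (j : Int) := by
        intro s hs
        rcases List.mem_append.mp hs with hs | hs
        · have := M_ub pfx s hs; omega
        · simp at hs; subst hs; omega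
      rw [H_eq_find? (pfx ++ [x]) j hj hub ⟨x, by simp, hq⟩]
      have hnone : pfx.find? (fun s => pvQ pvLocIndicators[j] s) = none := by
        rw [List.find?_eq_none]
        intro s hs hq'
        have h1 := rank_of_match s j hj hq'
        have h2 := M_ub pfx s hs
        omega
      rw [List.find?_append, hnone]
      simp [hq]
  · rw [if_neg hgt]
    by_cases hM : pvM pfx = -1
    · have hrx : pvRank x = -1 := by have := rank_lb x; omega
      rw [H_eq_none pfx hM, H_eq_none (pfx ++ [x])]
      rw [M_append_singleton, hM, hrx]
      simp
    · rcases M_cases pfx with h | ⟨s0, hs0, hM0⟩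
      · exact absurd h hM
      rcases rank_cases s0 with h0 | ⟨j, hj, hq0, hr0⟩
      · rw [hM0, h0] at hM; exact absurd rfl hM
      have hMj : pvM pfx = (j : Int) := by omega
      have hub1 : ∀ s ∈ pfx, pvRank s ≤ (j : Int) := by
        intro s hs; have := M_ub pfx s hs; omega
      have hub2 : ∀ s ∈ pfx ++ [x], pvRank s ≤ (j : Int) := by
        intro s hs
        rcases List.mem_append.mp hs with hs | hs
        · exact hub1 s hs
        · simp at hs; subst hs; omega
      rw [H_eq_find? pfx j hj hub1 ⟨s0, hs0, hq0⟩,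
        H_eq_find? (pfx ++ [x]) j hj hub2 ⟨s0, List.mem_append.mpr (Or.inl hs0), hq0⟩]
      obtain ⟨v, hv⟩ := Option.isSome_iff_exists.mp
        (List.find?_isSome.mpr ⟨s0, hs0, hq0⟩)
      rw [List.find?_append, hv]
      rfl

-- the fused fold computes (M, H) and the last conflict among indices ≥ cutoff
set_option maxHeartbeats 1000000 in
theorem fused_fold_spec (cutoff : Int) : ∀ (xs pfx : List String) (k : Int) (c : Option String),
    (PySem.List.enumerate xs k).foldl
      (fun (st : (Int × Option String) × Option String) is =>
        let low := PySem.Str.lower is.2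
        let rank := (PySem.List.enumerate pvLocIndicators 0).foldl
          (fun a ji => if PySem.Str.isIn ji.2 low then max a ji.1 else a) (-1)
        ((if rank > st.1.1 then (rank, some is.2) else st.1),
         (if is.1 ≥ cutoff ∧ pvConfIndicators.any (fun ind => PySem.Str.isIn ind low)
          then some is.2 else st.2)))
      ((pvM pfx, pvH pfx), c)
    = ((pvM (pfx ++ xs), pvH (pfx ++ xs)),
       ((xs.drop (cutoff - k).toNat).reverse.find? pvP).or c) := by
  intro xs
  induction xs with
  | nil =>
    intro pfx k c
    simp [PySem.List.enumerate_nil]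
  | cons x xs ih =>
    intro pfx k c
    rw [PySem.List.enumerate_cons, List.foldl_cons]
    simp only []
    have hrk : (PySem.List.enumerate pvLocIndicators 0).foldl
        (fun a ji => if PySem.Str.isIn ji.2 (PySem.Str.lower x) then max a ji.1 else a) (-1)
        = pvRank x := rfl
    have hcf : (pvConfIndicators.any fun ind => PySem.Str.isIn ind (PySem.Str.lower x))
        = pvP x := rfl
    rw [hrk, hcf]
    have hpair : (if pvRank x > pvM pfx then (pvRank x, some x) else (pvM pfx, pvH pfx))
        = (pvM (pfx ++ [x]), pvH (pfx ++ [x])) := by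
      rw [M_append_singleton, H_append_singleton]
      by_cases hgt : pvRank x > pvM pfx
      · rw [if_pos hgt, if_pos hgt]
        congr 1
        omega
      · rw [if_neg hgt, if_neg hgt]
        congr 1
        omega
    rw [hpair]
    refine Eq.trans (ih (pfx ++ [x]) (k + 1) (if k ≥ cutoff ∧ pvP x = true then some x else c)) ?_
    rw [List.append_cons pfx x xs]
    congr 1
    by_cases hk : cutoff ≤ k
    · have ht0 : (cutoff - k).toNat = 0 := by omega
      have ht1 : (cutoff - (k + 1)).toNat = 0 := by omega
      rw [ht0, ht1, List.drop_zero, List.drop_zero, List.reverse_cons, List.find?_append]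
      rcases hF : xs.reverse.find? pvP with _ | v <;> by_cases hPx : pvP x = true <;>
        simp [List.find?, hPx, hk, Option.or]
    · have hcond : ¬ (k ≥ cutoff ∧ pvP x = true) := fun h => hk h.1
      rw [if_neg hcond]
      have ht : (cutoff - k).toNat = (cutoff - (k + 1)).toNat + 1 := by omega
      rw [ht, List.drop_succ_cons]

-- ---------- main equality ----------

set_option maxHeartbeats 1000000 in
theorem main_eq (text summary : String) (chap_num : Int) :
    generate_next_chapter_guidance_py text summary chap_num
      = generate_next_chapter_guidance_py_alt text summary chap_num := by
  unfold generate_next_chapter_guidance_py generate_next_chapter_guidance_py_alt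
  generalize (if text ≠ "" then PySem.Str.slice text (some (-1500)) none else "") = ending
  simp only []
  set sentences := (PySem.Str.split? ending ".").getD [] with hsent
  -- A side: rewrite the location foldl as a flatMap over optional contributions
  have hb : (fun (acc : List String) ind =>
      if PySem.Str.isIn ind (PySem.Str.lower ending) then
        match sentences.find? (fun s => PySem.Str.isIn ind (PySem.Str.lower s)) with
        | some s => acc ++ [PySem.Str.strip s]
        | none => acc
      else acc)
      = fun (acc : List String) ind => acc ++
          ((sentences.find? (fun s => PySem.Str.isIn ind (PySem.Str.lower s))).map
            PySem.Str.strip).toList := by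
    funext acc ind
    cases hf : sentences.find? (fun s => PySem.Str.isIn ind (PySem.Str.lower s)) with
    | some s =>
      have := find?_some_isIn ending ind s (hsent ▸ hf)
      simp only [this]; simp
    | none => split <;> simp
  rw [hb, PySem.List.foldl_append_eq_flatMap, List.nil_append,
    getLast?_flatMap_opt, findSome?_map_comp,
    PySem.List.foldl_append_if, List.nil_append, getLast?_filter_map]
  -- B side: evaluate the fused fold
  have hB := fused_fold_spec ((sentences.length : Int) - 3) sentences [] 0 none
  simp only [show pvM [] = (-1 : Int) from rfl, show pvH [] = (none : Option String) from rfl,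
    List.nil_append, sub_zero, Option.or_none] at hB
  rw [hB]
  -- align the two canonical forms
  have hslice : PySem.List.slice sentences (some (-3)) none
      = sentences.drop ((sentences.length : Int) - 3).toNat := by
    rw [PySem.List.slice_from_neg_ofNat sentences 3 (by omega)]
    congr 1
    omega
  rw [hslice]
  rw [show (pvLocIndicators.reverse.findSome?
      (fun ind => sentences.find? (fun s => PySem.Str.isIn ind (PySem.Str.lower s))))
      = pvH sentences from rfl,
    show (fun s => pvConfIndicators.any fun ind => PySem.Str.isIn ind (PySem.Str.lower s))
      = pvP from rfl]
  cases h1 : pvH sentences <;>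
    cases h2 : (sentences.drop ((sentences.length : Int) - 3).toNat).reverse.find? pvP <;>
      simp

-- ===== VERDICT (by name: the statement is the Claim_ definition above) =====
theorem generate_next_chapter_guidance_py_spec : Claim_equal_generate_next_chapter_guidance_py := by
  intro text summary chap_num _h
  unfold Spec_generate_next_chapter_guidance_py
  exact main_eq text summary chap_num
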